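-- pv_equiv track=rewrite | github.com/javelezz1/Programming-course | uniprot_browser_2.0.py | verificar_registro
-- ===== SOURCE A (Python) =====
-- def verificar_registro(record:list, query:list)->bool:
--
--     conditions = len(query)
--     for logic in query:
--         value,fieldkey = logic.split(".in.")
--         for field in record:
--             fieldname = field[:2]
--             fieldvalue = field[2:].strip()
--             if not fieldkey=="SQ":
--                 if fieldname == fieldkey and value in fieldvalue:
--                     conditions -= 1
--                     break
--             elif value in fieldvalue:
--                 conditions-=1
--                 break
--     return conditions == 0
-- ===== SOURCE B (Python) =====
-- def verificar_registro(record: list, query: list) -> bool: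
--     # one pass over record: (key, stripped value) pairs, bucketed index, flat value list
--     pairs = [(field[:2], field[2:].strip()) for field in record]
--     index = {}
--     for k, v in pairs:
--         index.setdefault(k, []).append(v)
--     all_values = [v for _, v in pairs]
--     for logic in query:
--         value, fieldkey = logic.split(".in.")
--         if fieldkey == "SQ":
--             ok = any(value in v for v in all_values)
--         else:
--             ok = any(value in v for v in index.get(fieldkey, []))
--         if not ok:
--             return False
--     return True
-- ===== Notes on version B (the rewrite author's own statement) =====
-- stated objective: alternative
-- what changed: B makes one pass over record building a key->values bucket index plus a flat value list, then answers each query by any() over the relevant bucket (or all values for SQ) with early exit, instead of A's per-query full rescan of record with a decremented counter.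
-- outside the precondition, e.g. on verificar_registro([], ['a.in.b.in.c']): A raises ValueError, B raises ValueError
import Mathlib
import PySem

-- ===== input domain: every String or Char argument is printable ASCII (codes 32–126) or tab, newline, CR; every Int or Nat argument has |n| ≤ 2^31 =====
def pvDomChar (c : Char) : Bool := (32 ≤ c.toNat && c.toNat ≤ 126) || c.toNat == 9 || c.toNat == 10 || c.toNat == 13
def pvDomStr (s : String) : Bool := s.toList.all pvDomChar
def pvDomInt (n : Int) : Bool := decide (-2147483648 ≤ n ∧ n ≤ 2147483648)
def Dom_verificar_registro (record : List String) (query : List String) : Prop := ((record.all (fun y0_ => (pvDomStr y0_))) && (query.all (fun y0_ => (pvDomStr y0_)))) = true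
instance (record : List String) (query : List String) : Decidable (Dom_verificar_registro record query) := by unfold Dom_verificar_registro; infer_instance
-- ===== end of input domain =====

-- B builds a key→values index and a flat value list in one pass over record and answers each
-- query from the relevant bucket with early exit, instead of A's full rescan per query.

-- ===== PORT A =====
-- A's inner 'for field in record: … break' loop: returns true iff some field triggers the break
def vrInnerA (value fieldkey : String) : List String → Bool
  | [] => false
  | field :: rest =>
    let fieldname := PySem.Str.slice field none (some 2)
    let fieldvalue := PySem.Str.strip (PySem.Str.slice field (some 2) none)
    if !(fieldkey == "SQ") then
      if fieldname == fieldkey && PySem.Str.isIn value fieldvalue then true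
      else vrInnerA value fieldkey rest
    else if PySem.Str.isIn value fieldvalue then true
    else vrInnerA value fieldkey rest

def verificar_registro (record : List String) (query : List String) : Bool :=
  let conditions : Int := query.length
  let conditions := query.foldl (fun c logic =>
    match (PySem.Str.split? logic ".in.").getD [] with
    | [value, fieldkey] => if vrInnerA value fieldkey record then c - 1 else c
    | _ => c) conditions  -- unpacking mismatch: Python raises ValueError (outside Pre_)
  conditions == 0

-- ===== PORT B =====
def verificar_registro_alt (record : List String) (query : List String) : Bool :=
  let pairs := record.map (fun field =>
    (PySem.Str.slice field none (some 2), PySem.Str.strip (PySem.Str.slice field (some 2) none)))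
  let index := pairs.foldl (fun d p => d.modify p.1 [] (· ++ [p.2])) PySem.Dict.empty
  let all_values := pairs.map (·.2)
  query.all (fun logic =>
    let parts := (PySem.Str.split? logic ".in.").getD []
    if parts.length == 2 then
      let value := parts.headD ""
      let fieldkey := parts.tail.headD ""
      if fieldkey == "SQ" then all_values.any (fun v => PySem.Str.isIn value v)
      else (index.getD fieldkey []).any (fun v => PySem.Str.isIn value v)
    else false)  -- unpacking mismatch: Python raises ValueError (outside Pre_)

-- ===== PRECONDITION & SPEC =====
-- A (and B) raise ValueError when some query does not split on ".in." into exactly two pieces.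
def Pre_verificar_registro (_record : List String) (query : List String) : Prop :=
  ∀ q ∈ query, ((PySem.Str.split? q ".in.").getD []).length = 2
instance (record : List String) (query : List String) : Decidable (Pre_verificar_registro record query) := by unfold Pre_verificar_registro; infer_instance

def pvWitness_verificar_registro : List String × List String :=
  (["ID test", "SQ abcd"], ["test.in.ID", "bc.in.SQ"])

def Spec_verificar_registro (record : List String) (query : List String) (out : Bool) : Prop := out = verificar_registro_alt record query
instance (record : List String) (query : List String) (out : Bool) : Decidable (Spec_verificar_registro record query out) := by unfold Spec_verificar_registro; infer_instance

-- ===== CLAIM (what is proved, stated in full; the proofs are below) =====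
def Claim_equal_verificar_registro : Prop := ∀ (record : List String) (query : List String), Dom_verificar_registro record query → Pre_verificar_registro record query → Spec_verificar_registro record query (verificar_registro record query)

-- ===== LEMMAS AND PROOFS =====

-- per-query satisfaction as B computes it, record fixed
def vrSatB (record : List String) (logic : String) : Bool :=
  match (PySem.Str.split? logic ".in.").getD [] with
  | [value, fieldkey] =>
    if fieldkey == "SQ" then
      (record.map (fun f => PySem.Str.strip (PySem.Str.slice f (some 2) none))).any
        (fun v => PySem.Str.isIn value v)
    else
      (((record.map (fun field =>
          (PySem.Str.slice field none (some 2), PySem.Str.strip (PySem.Str.slice field (some 2) none)))).filter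
            (fun p => p.1 == fieldkey)).map (·.2)).any (fun v => PySem.Str.isIn value v)
  | _ => false

-- `List.all` respects pointwise equality on members (used to name B's per-query predicate)
theorem vr_all_congr_mem {α : Type} (l : List α) (p q : α → Bool)
    (h : ∀ x ∈ l, p x = q x) : l.all p = l.all q := by
  induction l with
  | nil => rfl
  | cons a t ih =>
    simp only [List.all_cons, h a (by simp), ih (fun x hx => h x (by simp [hx]))]

-- A's inner loop agrees with B's bucket/flat-list check
theorem vrInnerA_eq (value fieldkey : String) (record : List String) :
    vrInnerA value fieldkey record =
      (if fieldkey == "SQ" then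
        (record.map (fun f => PySem.Str.strip (PySem.Str.slice f (some 2) none))).any
          (fun v => PySem.Str.isIn value v)
      else
        (((record.map (fun field =>
            (PySem.Str.slice field none (some 2), PySem.Str.strip (PySem.Str.slice field (some 2) none)))).filter
              (fun p => p.1 == fieldkey)).map (·.2)).any (fun v => PySem.Str.isIn value v)) := by
  induction record with
  | nil => by_cases h : fieldkey = "SQ" <;> simp [vrInnerA, h]
  | cons f rest ih =>
    by_cases h : fieldkey = "SQ"
    · subst h
      by_cases hv : PySem.Chars.isIn value.toList
          (PySem.Chars.strip (PySem.List.slice f.toList (some 2) none)) = true <;>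
        simp [vrInnerA, hv, ih, Function.comp_def]
    · by_cases hk : PySem.Str.slice f none (some 2) = fieldkey <;>
        by_cases hv : PySem.Chars.isIn value.toList
          (PySem.Chars.strip (PySem.List.slice f.toList (some 2) none)) = true <;>
        simp [vrInnerA, h, hk, hv, ih]

-- B's result is the conjunction of vrSatB over the queries
theorem alt_eq_all (record query : List String) :
    verificar_registro_alt record query = query.all (vrSatB record) := by
  unfold verificar_registro_alt
  apply vr_all_congr_mem
  intro q _
  unfold vrSatB
  cases hs : (PySem.Str.split? q ".in.").getD [] with
  | nil => simp
  | cons a t =>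
    cases t with
    | nil => simp
    | cons b t2 =>
      cases t2 with
      | nil =>
        simp only [List.length_cons, List.length_nil, List.headD, List.tail]
        by_cases h : (b == "SQ") = true
        · simp [h, List.map_map, Function.comp_def]
        · rw [if_pos (by decide), if_neg h, if_neg h, PySem.Dict.getD_foldl_modify_append]
          rfl
      | cons c t3 => simp

-- A's counting fold computes len(query) minus the number of satisfied queries
theorem foldA_eq (record : List String) (query : List String) (c : Int) :
    query.foldl (fun c logic =>
      match (PySem.Str.split? logic ".in.").getD [] with
      | [value, fieldkey] => if vrInnerA value fieldkey record then c - 1 else c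
      | _ => c) c = c - (query.countP (vrSatB record) : Int) := by
  induction query generalizing c with
  | nil => simp
  | cons q rest ih =>
    simp only [List.foldl_cons, List.countP_cons, ih]
    have hstep : (match (PySem.Str.split? q ".in.").getD [] with
        | [value, fieldkey] => if vrInnerA value fieldkey record then c - 1 else c
        | _ => c) = if vrSatB record q then c - 1 else c := by
      unfold vrSatB
      cases hs : (PySem.Str.split? q ".in.").getD [] with
      | nil => simp
      | cons a t =>
        cases t with
        | nil => simp
        | cons b t2 =>
          cases t2 with
          | nil => simp [vrInnerA_eq, List.any_map]
          | cons c' t3 => simp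
    rw [hstep]
    by_cases hq : vrSatB record q = true
    · simp only [hq, if_true]
      push_cast
      ring
    · simp only [if_neg hq, Bool.not_eq_true] at *
      simp

-- ===== VERDICT (by name: the statement is the Claim_ definition above) =====
theorem verificar_registro_spec : Claim_equal_verificar_registro := by
  intro record query _ _
  unfold Spec_verificar_registro verificar_registro
  simp only [foldA_eq, alt_eq_all]
  have hle := List.countP_le_length (l := query) (p := vrSatB record)
  rcases Nat.lt_or_ge (query.countP (vrSatB record)) query.length with h | h
  · have h1 : ((query.length : Int) - (query.countP (vrSatB record) : Int) == 0) = false := by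
      simp only [beq_eq_false_iff_ne, ne_eq]
      omega
    have h2 : query.all (vrSatB record) = false := by
      by_contra hb
      rw [Bool.not_eq_false, List.all_eq_true] at hb
      have := (List.countP_eq_length (p := vrSatB record) (l := query)).mpr hb
      omega
    rw [h1, h2]
  · have heq : query.countP (vrSatB record) = query.length := le_antisymm hle h
    have h2 : query.all (vrSatB record) = true := by
      rw [List.all_eq_true]
      exact (List.countP_eq_length (p := vrSatB record)).mp heq
    rw [h2, heq]
    simp
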